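-- pv_equiv track=rewrite | github.com/lucacavenaghi97/bt-profile-switcher | bt-profile-switcher.py | pick_best_profiles
-- ===== SOURCE A (Python) =====
-- PREFERRED_PROFILES = {
--     "a2dp-sink": "Hi-Fi (LDAC)",
--     "a2dp-sink-sbc_xq": "Hi-Fi (SBC-XQ)",
--     "a2dp-sink-sbc": "Hi-Fi (SBC)",
--     "headset-head-unit-msbc": "Call (mSBC)",
--     "headset-head-unit": "Call (HSP/HFP)",
--     "headset-head-unit-cvsd": "Call (CVSD)",
-- }
--
-- def pick_best_profiles(profiles):
--     """Pick the best A2DP and best HSP/HFP profile from available ones.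
--
--     Returns list of (index, name, label) for at most 2 profiles.
--     """
--     a2dp_priority = ["a2dp-sink", "a2dp-sink-sbc_xq", "a2dp-sink-sbc"]
--     hfp_priority = ["headset-head-unit-msbc", "headset-head-unit", "headset-head-unit-cvsd"]
--
--     by_name = {name: (idx, name) for idx, name, _desc in profiles}
--     result = []
--
--     for order in (a2dp_priority, hfp_priority):
--         for name in order:
--             if name in by_name:
--                 idx, name = by_name[name]
--                 result.append((idx, name, PREFERRED_PROFILES[name]))
--                 break
--
--     return result
-- ===== SOURCE B (Python) =====
-- PREFERRED_PROFILES = {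
--     "a2dp-sink": "Hi-Fi (LDAC)",
--     "a2dp-sink-sbc_xq": "Hi-Fi (SBC-XQ)",
--     "a2dp-sink-sbc": "Hi-Fi (SBC)",
--     "headset-head-unit-msbc": "Call (mSBC)",
--     "headset-head-unit": "Call (HSP/HFP)",
--     "headset-head-unit-cvsd": "Call (CVSD)",
-- }
--
-- def pick_best_profiles(profiles):
--     """Pick the best A2DP and best HSP/HFP profile from available ones.
--
--     Single pass over profiles keeping the best-ranked candidate per
--     category (a later profile replaces an equally ranked earlier one,
--     matching dict overwrite semantics).
--     """
--     a2dp_rank = {"a2dp-sink": 0, "a2dp-sink-sbc_xq": 1, "a2dp-sink-sbc": 2}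
--     hfp_rank = {"headset-head-unit-msbc": 0, "headset-head-unit": 1,
--                 "headset-head-unit-cvsd": 2}
--
--     best_a = None  # (rank, idx, name)
--     best_h = None
--     for idx, name, _desc in profiles:
--         r = a2dp_rank.get(name)
--         if r is not None:
--             if best_a is None or r <= best_a[0]:
--                 best_a = (r, idx, name)
--         else:
--             r = hfp_rank.get(name)
--             if r is not None and (best_h is None or r <= best_h[0]):
--                 best_h = (r, idx, name)
--
--     result = []
--     for best in (best_a, best_h):
--         if best is not None:
--             result.append((best[1], best[2], PREFERRED_PROFILES[best[2]]))
--     return result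
-- ===== Notes on version B (the rewrite author's own statement) =====
-- stated objective: alternative
-- what changed: Instead of building a name->(idx,name) dict over all profiles and then scanning each fixed priority list for the first present name, B makes a single pass over profiles keeping, per category, the best-ranked candidate (a later profile replaces an equally ranked earlier one, matching dict overwrite), then emits the a2dp and hfp winners.
import Mathlib
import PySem

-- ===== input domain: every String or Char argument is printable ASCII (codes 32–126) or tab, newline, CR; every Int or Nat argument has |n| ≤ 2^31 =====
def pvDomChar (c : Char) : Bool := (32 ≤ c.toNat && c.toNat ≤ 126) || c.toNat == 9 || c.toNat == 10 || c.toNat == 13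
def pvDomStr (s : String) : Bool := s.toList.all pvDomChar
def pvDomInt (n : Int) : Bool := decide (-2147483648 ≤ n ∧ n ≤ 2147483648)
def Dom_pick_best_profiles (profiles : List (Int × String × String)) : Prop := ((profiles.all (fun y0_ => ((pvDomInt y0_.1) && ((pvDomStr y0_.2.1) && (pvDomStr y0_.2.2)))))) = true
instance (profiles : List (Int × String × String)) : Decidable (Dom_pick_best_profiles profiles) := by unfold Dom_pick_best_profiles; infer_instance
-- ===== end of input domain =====

-- B replaces A's dict-then-priority-scan by a single pass over profiles keeping the best-ranked
-- candidate per category (objective: alternative decomposition, same output).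


-- ===== PORT A =====
def pvPreferred : PySem.Dict String String := PySem.Dict.ofList
  [("a2dp-sink", "Hi-Fi (LDAC)"),
   ("a2dp-sink-sbc_xq", "Hi-Fi (SBC-XQ)"),
   ("a2dp-sink-sbc", "Hi-Fi (SBC)"),
   ("headset-head-unit-msbc", "Call (mSBC)"),
   ("headset-head-unit", "Call (HSP/HFP)"),
   ("headset-head-unit-cvsd", "Call (CVSD)")]

def pvA2dpPriority : List String := ["a2dp-sink", "a2dp-sink-sbc_xq", "a2dp-sink-sbc"]
def pvHfpPriority : List String := ["headset-head-unit-msbc", "headset-head-unit", "headset-head-unit-cvsd"]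

-- inner 'for name in order: if name in by_name: …; break'
-- (PREFERRED_PROFILES[name] cannot raise: name is a priority-list name, all of which are keys)
def pvInnerA (by_name : PySem.Dict String (Int × String)) : List String → List (Int × String × String)
  | [] => []
  | n :: rest =>
    match by_name.get? n with
    | some p => [(p.1, p.2, (pvPreferred.get? p.2).getD "")]
    | none => pvInnerA by_name rest

-- by_name = {name: (idx, name) for idx, name, _desc in profiles}
def pvByName (profiles : List (Int × String × String)) : PySem.Dict String (Int × String) :=
  profiles.foldl (fun d p => d.insert p.2.1 (p.1, p.2.1)) PySem.Dict.empty

def pick_best_profiles (profiles : List (Int × String × String)) : List (Int × String × String) :=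
  let by_name := pvByName profiles
  [pvA2dpPriority, pvHfpPriority].foldl (fun res order => res ++ pvInnerA by_name order) []

-- ===== PORT B =====
def pvRankA : PySem.Dict String Nat := PySem.Dict.ofList
  [("a2dp-sink", 0), ("a2dp-sink-sbc_xq", 1), ("a2dp-sink-sbc", 2)]
def pvRankH : PySem.Dict String Nat := PySem.Dict.ofList
  [("headset-head-unit-msbc", 0), ("headset-head-unit", 1), ("headset-head-unit-cvsd", 2)]

def pvBetter (r : Nat) : Option (Nat × Int × String) → Bool
  | none => true
  | some (r0, _, _) => r ≤ r0

def pvStep (s : Option (Nat × Int × String) × Option (Nat × Int × String))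
    (p : Int × String × String) :
    Option (Nat × Int × String) × Option (Nat × Int × String) :=
  match pvRankA.get? p.2.1 with
  | some r => if pvBetter r s.1 then (some (r, p.1, p.2.1), s.2) else s
  | none =>
    match pvRankH.get? p.2.1 with
    | some r => if pvBetter r s.2 then (s.1, some (r, p.1, p.2.1)) else s
    | none => s

def pvEmit : Option (Nat × Int × String) → List (Int × String × String)
  | none => []
  | some (_, i, n) => [(i, n, (pvPreferred.get? n).getD "")]

def pick_best_profiles_alt (profiles : List (Int × String × String)) : List (Int × String × String) :=
  let s := profiles.foldl pvStep (none, none)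
  pvEmit s.1 ++ pvEmit s.2

-- ===== PRECONDITION & SPEC =====
def Spec_pick_best_profiles (profiles : List (Int × String × String)) (out : List (Int × String × String)) : Prop := out = pick_best_profiles_alt profiles
instance (profiles : List (Int × String × String)) (out : List (Int × String × String)) : Decidable (Spec_pick_best_profiles profiles out) := by unfold Spec_pick_best_profiles; infer_instance

-- ===== CLAIM (what is proved, stated in full; the proofs are below) =====
def Claim_equal_pick_best_profiles : Prop := ∀ (profiles : List (Int × String × String)), Dom_pick_best_profiles profiles → Spec_pick_best_profiles profiles (pick_best_profiles profiles)

-- ===== LEMMAS AND PROOFS =====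

-- rank of n in a priority list: index of its first occurrence
def pvRankIn : List String → String → Option Nat
  | [], _ => none
  | m :: rest, n => if m = n then some 0 else (pvRankIn rest n).map (· + 1)

-- first name of `order` present in d, with its position in `order` (offset k) and the dict value
def pvSelR (d : PySem.Dict String (Int × String)) : List String → Nat → Option (Nat × Int × String)
  | [], _ => none
  | n :: rest, k =>
    match d.get? n with
    | some p => some (k, p.1, p.2)
    | none => pvSelR d rest (k + 1)

theorem pvRankA_eq (n : String) : pvRankA.get? n = pvRankIn pvA2dpPriority n := by
  by_cases h1 : "a2dp-sink" = n
  · subst h1; decide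
  by_cases h2 : "a2dp-sink-sbc_xq" = n
  · subst h2; decide
  by_cases h3 : "a2dp-sink-sbc" = n
  · subst h3; decide
  have hk : pvRankA.get? n = none := by
    rw [PySem.Dict.get?_eq_none_iff_not_mem_keys]
    have hks : pvRankA.keys = ["a2dp-sink", "a2dp-sink-sbc_xq", "a2dp-sink-sbc"] := by decide
    rw [hks]
    intro hmem
    rcases List.mem_cons.mp hmem with h | hmem
    · exact h1 h.symm
    rcases List.mem_cons.mp hmem with h | hmem
    · exact h2 h.symm
    rcases List.mem_cons.mp hmem with h | hmem
    · exact h3 h.symm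
    simp at hmem
  rw [hk]
  simp [pvRankIn, pvA2dpPriority, h1, h2, h3]

theorem pvRankH_eq (n : String) : pvRankH.get? n = pvRankIn pvHfpPriority n := by
  by_cases h1 : "headset-head-unit-msbc" = n
  · subst h1; decide
  by_cases h2 : "headset-head-unit" = n
  · subst h2; decide
  by_cases h3 : "headset-head-unit-cvsd" = n
  · subst h3; decide
  have hk : pvRankH.get? n = none := by
    rw [PySem.Dict.get?_eq_none_iff_not_mem_keys]
    have hks : pvRankH.keys = ["headset-head-unit-msbc", "headset-head-unit", "headset-head-unit-cvsd"] := by decide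
    rw [hks]
    intro hmem
    rcases List.mem_cons.mp hmem with h | hmem
    · exact h1 h.symm
    rcases List.mem_cons.mp hmem with h | hmem
    · exact h2 h.symm
    rcases List.mem_cons.mp hmem with h | hmem
    · exact h3 h.symm
    simp at hmem
  rw [hk]
  simp [pvRankIn, pvHfpPriority, h1, h2, h3]

-- the two priority lists are disjoint
theorem pvDisjAH (n : String) (r : Nat) (h : pvRankIn pvA2dpPriority n = some r) :
    pvRankIn pvHfpPriority n = none := by
  by_cases h1 : "a2dp-sink" = n
  · subst h1; decide
  by_cases h2 : "a2dp-sink-sbc_xq" = n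
  · subst h2; decide
  by_cases h3 : "a2dp-sink-sbc" = n
  · subst h3; decide
  simp [pvRankIn, pvA2dpPriority, h1, h2, h3] at h

theorem pvInnerA_eq_emit_selR (d : PySem.Dict String (Int × String)) (order : List String)
    (k : Nat) : pvInnerA d order = pvEmit (pvSelR d order k) := by
  induction order generalizing k with
  | nil => rfl
  | cons n rest ih =>
    simp only [pvInnerA, pvSelR]
    cases d.get? n with
    | none => exact ih (k + 1)
    | some p => rfl

theorem pvByName_append (l : List (Int × String × String)) (x : Int × String × String)
    (m : String) :
    (pvByName (l ++ [x])).get? m =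
      if m = x.2.1 then some (x.1, x.2.1) else (pvByName l).get? m := by
  simp only [pvByName, List.foldl_append, List.foldl_cons, List.foldl_nil]
  exact PySem.Dict.get?_insert _ _ _ _

theorem pvSelR_ge (d : PySem.Dict String (Int × String)) (order : List String) (k : Nat)
    (t : Nat × Int × String) (h : pvSelR d order k = some t) : k ≤ t.1 := by
  induction order generalizing k with
  | nil => simp [pvSelR] at h
  | cons n rest ih =>
    simp only [pvSelR] at h
    cases hg : d.get? n with
    | none => rw [hg] at h; exact Nat.le_of_succ_le (ih (k + 1) h)
    | some p => rw [hg] at h; cases h; rfl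

theorem pvSelR_skip (d d' : PySem.Dict String (Int × String)) (n : String) (i : Int)
    (hgd : ∀ m, d'.get? m = if m = n then some (i, n) else d.get? m)
    (order : List String) (hn : pvRankIn order n = none) (k : Nat) :
    pvSelR d' order k = pvSelR d order k := by
  induction order generalizing k with
  | nil => rfl
  | cons m rest ih =>
    simp only [pvRankIn] at hn
    by_cases hmn : m = n
    · simp [hmn] at hn
    · simp only [hmn, if_false, Option.map_eq_none_iff] at hn
      simp only [pvSelR, hgd m, hmn, if_false]
      cases d.get? m with
      | none => exact ih hn (k + 1)
      | some p => rfl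

theorem pvSelR_update (d d' : PySem.Dict String (Int × String)) (n : String) (i : Int)
    (hgd : ∀ m, d'.get? m = if m = n then some (i, n) else d.get? m)
    (order : List String) (r : Nat) (hr : pvRankIn order n = some r) (k : Nat) :
    pvSelR d' order k =
      match pvSelR d order k with
      | none => some (k + r, i, n)
      | some t => if k + r ≤ t.1 then some (k + r, i, n) else some t := by
  induction order generalizing k r with
  | nil => simp [pvRankIn] at hr
  | cons m rest ih =>
    simp only [pvRankIn] at hr
    by_cases hmn : m = n
    · rw [if_pos hmn] at hr
      injection hr with hr; subst hr
      have hd' : d'.get? m = some (i, n) := by rw [hgd m]; exact if_pos hmn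
      simp only [pvSelR, hd', Nat.add_zero]
      cases hg : d.get? m with
      | some p => simp
      | none =>
        cases hs : pvSelR d rest (k + 1) with
        | none => simp
        | some t =>
          have := pvSelR_ge d rest (k + 1) t hs
          simp only [if_pos (by omega : k ≤ t.1)]
    · simp only [hmn, if_false, Option.map_eq_some_iff] at hr
      obtain ⟨r', hr', rfl⟩ := hr
      simp only [pvSelR, hgd m, hmn, if_false]
      cases hg : d.get? m with
      | some p =>
        simp only [if_neg (by omega : ¬ k + (r' + 1) ≤ k)]
      | none =>
        rw [ih r' hr' (k + 1)]
        have : k + 1 + r' = k + (r' + 1) := by omega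
        rw [this]

theorem pvFoldl_inv (l : List (Int × String × String)) :
    l.foldl pvStep (none, none) =
      (pvSelR (pvByName l) pvA2dpPriority 0, pvSelR (pvByName l) pvHfpPriority 0) := by
  induction l using List.reverseRecOn with
  | nil => rfl
  | append_singleton l x ih =>
    rw [List.foldl_append, List.foldl_cons, List.foldl_nil, ih]
    have hgd := pvByName_append l x
    simp only [pvStep, pvRankA_eq, pvRankH_eq]
    cases hra : pvRankIn pvA2dpPriority x.2.1 with
    | some r =>
      have hrh := pvDisjAH x.2.1 r hra
      rw [pvSelR_update (pvByName l) (pvByName (l ++ [x])) x.2.1 x.1 hgd pvA2dpPriority r hra 0,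
        pvSelR_skip (pvByName l) (pvByName (l ++ [x])) x.2.1 x.1 hgd pvHfpPriority hrh 0]
      cases hs : pvSelR (pvByName l) pvA2dpPriority 0 with
      | none => simp [pvBetter]
      | some t =>
        obtain ⟨r0, i0, n0⟩ := t
        simp only [pvBetter, Nat.zero_add]
        by_cases hle : r ≤ r0 <;> simp [hle]
    | none =>
      cases hrh : pvRankIn pvHfpPriority x.2.1 with
      | some r =>
        rw [pvSelR_update (pvByName l) (pvByName (l ++ [x])) x.2.1 x.1 hgd pvHfpPriority r hrh 0,
          pvSelR_skip (pvByName l) (pvByName (l ++ [x])) x.2.1 x.1 hgd pvA2dpPriority hra 0]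
        cases hs : pvSelR (pvByName l) pvHfpPriority 0 with
        | none => simp [pvBetter]
        | some t =>
          obtain ⟨r0, i0, n0⟩ := t
          simp only [pvBetter, Nat.zero_add]
          by_cases hle : r ≤ r0 <;> simp [hle]
      | none =>
        rw [pvSelR_skip (pvByName l) (pvByName (l ++ [x])) x.2.1 x.1 hgd pvA2dpPriority hra 0,
          pvSelR_skip (pvByName l) (pvByName (l ++ [x])) x.2.1 x.1 hgd pvHfpPriority hrh 0]

-- ===== VERDICT (by name: the statement is the Claim_ definition above) =====
theorem pick_best_profiles_spec : Claim_equal_pick_best_profiles := by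
  intro profiles _
  show pick_best_profiles profiles = pick_best_profiles_alt profiles
  simp only [pick_best_profiles, pick_best_profiles_alt, List.foldl_cons, List.foldl_nil,
    List.nil_append, pvFoldl_inv]
  rw [pvInnerA_eq_emit_selR (pvByName profiles) pvA2dpPriority 0,
    pvInnerA_eq_emit_selR (pvByName profiles) pvHfpPriority 0]
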